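-- pv_equiv track=rewrite | github.com/monuelo/PythonExamples | functions/soma_diminui.py | soma_diminui_vizinhos
-- ===== SOURCE A (Python) =====
-- def soma_diminui_vizinhos(lista):
-- 	result = 0
-- 	if lista == []:
-- 		return result
-- 	else:
-- 		result += lista[0]
-- 		for i in range(1, len(lista)):
-- 		 	if(i % 2 == 0):
-- 		 		result -= lista[i]
-- 		 	else:
-- 		 		result += lista[i]
-- 	return result
-- ===== SOURCE B (Python) =====
-- def soma_diminui_vizinhos(lista):
-- 	result = 0
-- 	if lista == []:
-- 		return result
-- 	total = lista[0]
-- 	it = iter(lista[1:])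
-- 	for x in it:
-- 		total += x - next(it, 0)
-- 	return total
-- ===== Notes on version B (the rewrite author's own statement) =====
-- stated objective: alternative
-- what changed: Replaces the indexed loop with a parity test per index by a pair-consuming iterator loop over the tail that adds and subtracts one pair (x - next) per step, no index arithmetic at all.
import Mathlib
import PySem

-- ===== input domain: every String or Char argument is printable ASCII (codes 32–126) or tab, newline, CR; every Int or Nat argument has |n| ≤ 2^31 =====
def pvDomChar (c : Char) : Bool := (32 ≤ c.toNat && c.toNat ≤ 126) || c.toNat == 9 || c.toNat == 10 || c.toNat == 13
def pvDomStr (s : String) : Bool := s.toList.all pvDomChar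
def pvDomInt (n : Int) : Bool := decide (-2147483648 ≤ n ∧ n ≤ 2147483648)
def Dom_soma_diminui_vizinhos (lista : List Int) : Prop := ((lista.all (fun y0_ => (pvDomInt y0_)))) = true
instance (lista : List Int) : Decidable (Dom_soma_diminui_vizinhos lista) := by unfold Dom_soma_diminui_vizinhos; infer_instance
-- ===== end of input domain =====

-- B replaces the indexed parity-branching loop by a pair-consuming loop over the tail (alternative decomposition, same cost).
-- ===== PORT A =====
def soma_diminui_vizinhos (lista : List Int) : Int :=
  if lista == [] then 0
  else
    (PySem.List.pyRange 1 (lista.length : Int) 1).foldl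
      (fun result i =>
        if i % 2 == 0 then result - PySem.List.pyGetD lista i 0
        else result + PySem.List.pyGetD lista i 0)
      (PySem.List.pyGetD lista 0 0)

-- ===== PORT B =====
-- 'for x in it: total += x - next(it, 0)' consumes the tail two elements at a time (default 0 for a missing partner)
def pvPairsLoop : List Int → Int → Int
  | [], total => total
  | [x], total => total + (x - 0)
  | x :: y :: rest, total => pvPairsLoop rest (total + (x - y))

def soma_diminui_vizinhos_alt (lista : List Int) : Int :=
  if lista == [] then 0
  else
    match lista with
    | [] => 0
    | x :: rest => pvPairsLoop rest x

-- ===== PRECONDITION & SPEC =====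
def Spec_soma_diminui_vizinhos (lista : List Int) (out : Int) : Prop := out = soma_diminui_vizinhos_alt lista
instance (lista : List Int) (out : Int) : Decidable (Spec_soma_diminui_vizinhos lista out) := by unfold Spec_soma_diminui_vizinhos; infer_instance

-- ===== CLAIM (what is proved, stated in full; the proofs are below) =====
def Claim_equal_soma_diminui_vizinhos : Prop := ∀ (lista : List Int), Dom_soma_diminui_vizinhos lista → Spec_soma_diminui_vizinhos lista (soma_diminui_vizinhos lista)

-- ===== LEMMAS AND PROOFS =====

-- ===== VERDICT (by name: the statement is the Claim_ definition above) =====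
-- signed one-at-a-time accumulator: common characterisation of both loops
def pvSigned : List Int → Int → Int → Int
  | [], total, _ => total
  | x :: rest, total, s => pvSigned rest (total + s * x) (-s)

theorem pvPairsLoop_eq_signed (xs : List Int) (total : Int) :
    pvPairsLoop xs total = pvSigned xs total 1 := by
  induction xs, total using pvPairsLoop.induct with
  | case1 total => simp [pvPairsLoop, pvSigned]
  | case2 total x => simp [pvPairsLoop, pvSigned]
  | case3 total x y rest ih =>
      simp only [pvPairsLoop, pvSigned, ih]
      ring_nf

theorem pvFoldl_eq_signed (xs : List Int) :
    ∀ (n k : Nat) (total : Int), n = xs.length - k →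
    (PySem.List.pyRange (k : Int) (xs.length : Int) 1).foldl
      (fun result i =>
        if i % 2 == 0 then result - PySem.List.pyGetD xs i 0
        else result + PySem.List.pyGetD xs i 0) total
      = pvSigned (xs.drop k) total (if k % 2 = 1 then 1 else -1) := by
  intro n
  induction n with
  | zero =>
      intro k total hk
      have hle : xs.length ≤ k := by omega
      rw [PySem.List.pyRange_one_eq_nil (by exact_mod_cast hle)]
      rw [List.drop_eq_nil_of_le hle]
      simp [pvSigned]
  | succ m ih =>
      intro k total hk
      have hlt : k < xs.length := by omega
      rw [PySem.List.pyRange_one_cons (by exact_mod_cast hlt)]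
      have hget : PySem.List.pyGetD xs (k : Int) 0 = xs[k] := by
        simp [List.getD_eq_getElem?_getD, List.getElem?_eq_getElem hlt]
      have hdrop : xs.drop k = xs[k] :: xs.drop (k + 1) :=
        List.drop_eq_getElem_cons hlt
      simp only [List.foldl_cons]
      have hstep : ((k : Int) + 1) = ((k + 1 : Nat) : Int) := by push_cast; ring
      rw [hstep, ih (k + 1) _ (by omega), hdrop]
      by_cases hp : k % 2 = 1
      · have h2 : ¬ ((k : Int) % 2 == 0) = true := by
          simp; omega
        simp only [hp, if_pos, h2, if_false, Bool.false_eq_true, hget]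
        have : (k + 1) % 2 = 0 := by omega
        simp [pvSigned, this]
      · have hk0 : k % 2 = 0 := by omega
        have h2 : ((k : Int) % 2 == 0) = true := by
          simp; omega
        simp only [h2, if_true, hget]
        have : (k + 1) % 2 = 1 := by omega
        simp [pvSigned, hk0, this, sub_eq_add_neg]

theorem soma_diminui_vizinhos_spec : Claim_equal_soma_diminui_vizinhos := by
  intro lista _
  unfold Spec_soma_diminui_vizinhos soma_diminui_vizinhos soma_diminui_vizinhos_alt
  match lista with
  | [] => simp
  | x :: rest =>
      have h0 : PySem.List.pyGetD (x :: rest) 0 0 = x := by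
        simp [PySem.List.pyGetD]
      have hfold := pvFoldl_eq_signed (x :: rest) ((x :: rest).length - 1) 1 x rfl
      norm_num at hfold
      simp [h0, hfold, pvPairsLoop_eq_signed]
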